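-- pv_equiv track=rewrite | github.com/MrBrantCode/unitest_baseline | mut_generate/mist_train_taco/taco_16220/solution.py | find_longest_segment_length
-- ===== SOURCE A (Python) =====
-- def find_longest_segment_length(arr, k):
--     tarr = []
--     p = -1
--
--     for i in range(len(arr)):
--         if arr[i] > k:
--             if p == -1:
--                 p = arr[i]
--                 tarr.append(i)
--             elif arr[i] != p:
--                 tarr.append(i)
--                 p = arr[i]
--
--     if len(tarr) == 0:
--         return 0
--     elif len(tarr) == 1:
--         return len(arr)
--     else:
--         mtn = max(tarr[1], len(arr) - tarr[-2] - 1)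
--         for i in range(1, len(tarr) - 1):
--             mtn = max(mtn, tarr[i] - tarr[i - 1] + tarr[i + 1] - tarr[i] - 1)
--         return mtn
-- ===== SOURCE B (Python) =====
-- def find_longest_segment_length(arr, k):
--     # One streaming pass: never build the list of recorded indices; keep a
--     # rolling window (prev, cur) of the last two recorded positions.
--     p = -1
--     prev = -1
--     cur = None
--     ans = 0
--     for i, v in enumerate(arr):
--         if v > k and (p == -1 or v != p):
--             if cur is None:
--                 cur = i
--             else:
--                 gap = i - prev - 1
--                 if gap > ans:
--                     ans = gap
--                 prev = cur
--                 cur = i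
--             p = v
--     if cur is None:
--         return 0
--     last = len(arr) - prev - 1
--     return ans if ans > last else last
-- ===== Notes on version B (the rewrite author's own statement) =====
-- stated objective: faster
-- what changed: Fused A's two passes (build the list tarr of recorded indices, then scan it for the max gap) into one streaming loop that keeps only the last two recorded positions (prev/cur) and a running maximum, never materialising tarr.
import Mathlib
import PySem

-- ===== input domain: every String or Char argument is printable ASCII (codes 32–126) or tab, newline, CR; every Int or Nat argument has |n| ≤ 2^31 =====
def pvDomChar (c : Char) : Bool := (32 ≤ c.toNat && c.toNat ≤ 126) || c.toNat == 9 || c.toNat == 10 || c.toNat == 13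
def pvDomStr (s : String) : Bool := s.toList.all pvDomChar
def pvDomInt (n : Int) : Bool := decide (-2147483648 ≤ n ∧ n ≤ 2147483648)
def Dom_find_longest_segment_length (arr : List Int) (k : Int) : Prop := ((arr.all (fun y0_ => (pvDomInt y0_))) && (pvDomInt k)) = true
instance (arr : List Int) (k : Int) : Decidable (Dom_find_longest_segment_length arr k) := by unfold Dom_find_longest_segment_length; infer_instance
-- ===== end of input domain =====

-- B fuses A's two passes into one streaming loop keeping only the last two recorded
-- positions and a running maximum (no tarr list); measured faster by a constant factor.

-- ===== PORT A =====
-- loop body of A's first pass: 'if arr[i] > k: if p == -1: … elif arr[i] != p: …'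
def pvAStep (k : Int) (st : List Int × Int) (i v : Int) : List Int × Int :=
  if v > k then
    if st.2 = -1 then (st.1 ++ [i], v)
    else if v ≠ st.2 then (st.1 ++ [i], v)
    else st
  else st

def find_longest_segment_length (arr : List Int) (k : Int) : Int :=
  -- first pass: build tarr (recorded indices) and p over 'for i in range(len(arr))'
  let st := (PySem.List.pyRange 0 (PySem.List.len arr) 1).foldl
    (fun st i => pvAStep k st i (PySem.List.pyGetD arr i 0)) ([], -1)  -- arr[i]: i always in range
  let tarr := st.1
  if tarr.length = 0 then 0
  else if tarr.length = 1 then PySem.List.len arr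
  else
    let mtn := max (PySem.List.pyGetD tarr 1 0)
      (PySem.List.len arr - PySem.List.pyGetD tarr (-2) 0 - 1)   -- tarr[1], tarr[-2]: in range (len ≥ 2)
    (PySem.List.pyRange 1 ((tarr.length : Int) - 1) 1).foldl
      (fun mtn i => max mtn (PySem.List.pyGetD tarr i 0 - PySem.List.pyGetD tarr (i-1) 0
        + PySem.List.pyGetD tarr (i+1) 0 - PySem.List.pyGetD tarr i 0 - 1)) mtn

-- ===== PORT B =====
-- loop body of B: state (p, prev, cur, ans)
def pvBStep (k : Int) (st : Int × Int × Option Int × Int) (iv : Int × Int) :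
    Int × Int × Option Int × Int :=
  if iv.2 > k ∧ (st.1 = -1 ∨ iv.2 ≠ st.1) then
    match st.2.2.1 with
    | none => (iv.2, st.2.1, some iv.1, st.2.2.2)
    | some c =>
      let gap := iv.1 - st.2.1 - 1
      (iv.2, c, some iv.1, if gap > st.2.2.2 then gap else st.2.2.2)
  else st

def find_longest_segment_length_alt (arr : List Int) (k : Int) : Int :=
  let st := (PySem.List.enumerate arr).foldl (pvBStep k) (-1, -1, none, 0)
  match st.2.2.1 with
  | none => 0
  | some _ =>
    let last := PySem.List.len arr - st.2.1 - 1
    if st.2.2.2 > last then st.2.2.2 else last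

-- ===== PRECONDITION & SPEC =====
def Spec_find_longest_segment_length (arr : List Int) (k : Int) (out : Int) : Prop := out = find_longest_segment_length_alt arr k
instance (arr : List Int) (k : Int) (out : Int) : Decidable (Spec_find_longest_segment_length arr k out) := by unfold Spec_find_longest_segment_length; infer_instance

-- ===== CLAIM (what is proved, stated in full; the proofs are below) =====
def Claim_equal_find_longest_segment_length : Prop := ∀ (arr : List Int) (k : Int), Dom_find_longest_segment_length arr k → Spec_find_longest_segment_length arr k (find_longest_segment_length arr k)

-- ===== LEMMAS AND PROOFS =====

-- B's rolling state (prev, cur, ans) as a function of the REVERSED list of recorded indices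
def bStateRev : List Int → Int × Option Int × Int
  | [] => (-1, none, 0)
  | [c] => (-1, some c, 0)
  | i :: c :: rest =>
    let s := bStateRev (c :: rest)
    (c, some i, max s.2.2 (i - s.1 - 1))

theorem bStateRev_cur_cons (c : Int) (rest : List Int) :
    (bStateRev (c :: rest)).2.1 = some c := by
  cases rest <;> simp [bStateRev]

theorem ite_gt_eq_max (a b : Int) : (if b > a then b else a) = max a b := by
  rw [max_def]; split_ifs <;> omega

-- the two loop bodies agree, transported through bStateRev
theorem step_agree (k : Int) (tarr : List Int) (p : Int) (iv : Int × Int) :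
    pvBStep k (p, bStateRev tarr.reverse) iv =
      ((pvAStep k (tarr, p) iv.1 iv.2).2,
        bStateRev (pvAStep k (tarr, p) iv.1 iv.2).1.reverse) := by
  obtain ⟨i, v⟩ := iv
  by_cases hv : v > k
  · by_cases hrec : p = -1 ∨ v ≠ p
    · have hA : pvAStep k (tarr, p) i v = (tarr ++ [i], v) := by
        rcases hrec with h | h
        · simp [pvAStep, hv, h]
        · simp only [pvAStep, if_pos hv]
          split_ifs <;> simp_all
      rw [hA]
      rcases hrev : tarr.reverse with _ | ⟨c, rest⟩
      · simp [pvBStep, hv, hrec, hrev, bStateRev]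
      · simp only [pvBStep, hv, hrec, and_self, if_pos, List.reverse_append,
          List.reverse_cons, List.reverse_nil, List.nil_append, List.singleton_append, hrev]
        simp [bStateRev, bStateRev_cur_cons, ite_gt_eq_max]
    · obtain ⟨h1, h2⟩ : ¬p = -1 ∧ ¬v ≠ p := by tauto
      simp [pvAStep, pvBStep, h1, h2]
  · simp [pvAStep, pvBStep, hv]

-- the whole folds agree
theorem fold_agree (k : Int) (l : List (Int × Int)) (tarr : List Int) (p : Int) :
    l.foldl (pvBStep k) (p, bStateRev tarr.reverse) =
      ((l.foldl (fun st iv => pvAStep k st iv.1 iv.2) (tarr, p)).2,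
        bStateRev (l.foldl (fun st iv => pvAStep k st iv.1 iv.2) (tarr, p)).1.reverse) := by
  induction l generalizing tarr p with
  | nil => simp
  | cons x t ih =>
    simp only [List.foldl_cons, step_agree k tarr p x]
    exact ih _ _

-- all recorded indices are nonnegative
theorem fold_nonneg (k : Int) (l : List (Int × Int)) (tarr : List Int) (p : Int)
    (h0 : ∀ t ∈ tarr, 0 ≤ t) (hl : ∀ iv ∈ l, 0 ≤ iv.1) :
    ∀ t ∈ (l.foldl (fun st (iv : Int × Int) => pvAStep k st iv.1 iv.2) (tarr, p)).1, 0 ≤ t := by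
  induction l generalizing tarr p with
  | nil => simpa using h0
  | cons x t ih =>
    simp only [List.foldl_cons]
    have hx : 0 ≤ x.1 := hl x (by simp)
    have hstep : ∀ u ∈ (pvAStep k (tarr, p) x.1 x.2).1, 0 ≤ u := by
      intro u hu
      simp only [pvAStep] at hu
      split_ifs at hu <;> simp_all <;> rcases hu with hu | hu <;> simp_all [h0 u]
    rcases hA : pvAStep k (tarr, p) x.1 x.2 with ⟨t', p'⟩
    exact ih t' p' (by rw [hA] at hstep; exact hstep) (fun iv hiv => hl iv (by simp [hiv]))

-- pyGetD on an appended list, index in the left part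
theorem pyGetD_append_left (l t : List Int) (j : Int) (h0 : 0 ≤ j) (h1 : j < l.length) :
    PySem.List.pyGetD (l ++ t) j 0 = PySem.List.pyGetD l j 0 := by
  rw [PySem.List.pyGetD_eq_getElem _ _ h0 (by simp; omega),
      PySem.List.pyGetD_eq_getElem _ _ h0 (by exact_mod_cast h1)]
  exact List.getElem_append_left (by omega)

-- tarr[-2] is the second-to-last element
theorem pyGetD_neg_two (l : List Int) (c i : Int) :
    PySem.List.pyGetD (l ++ [c, i]) (-2) 0 = c := by
  simp only [PySem.List.pyGetD, PySem.List.pyGet?, PySem.List.pyIdx?]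
  have hlen : (l ++ [c, i]).length = l.length + 2 := by simp
  rw [hlen]
  norm_num
  simp only [show Int.toNat 2 = 2 from rfl, Nat.add_sub_cancel]
  simp [List.getElem_append_right]

-- last element of an appended singleton
theorem pyGetD_append_last (l : List Int) (i : Int) :
    PySem.List.pyGetD (l ++ [i]) (l.length : Int) 0 = i := by
  rw [PySem.List.pyGetD_eq_getElem _ _ (by positivity) (by simp)]
  simp

-- pull a max component out of a running-max fold
theorem maxfold_start (l : List Int) (f : Int → Int) (A B : Int) :
    l.foldl (fun m i => max m (f i)) (max A B) = max A (l.foldl (fun m i => max m (f i)) B) := by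
  induction l generalizing B with
  | nil => rfl
  | cons x t ih =>
    simp only [List.foldl_cons, max_assoc]
    exact ih (max B (f x))

-- A's middle-gap scan computes B's running maximum `ans`
theorem bStateRev_fst (x y : Int) (t : List Int) : (bStateRev (x :: y :: t)).1 = y := by
  simp [bStateRev]

theorem n_lemma : ∀ (r : List Int), 2 ≤ r.length → (∀ t ∈ r, 0 ≤ t) →
    (PySem.List.pyRange 1 ((r.length : Int) - 1) 1).foldl
      (fun m j => max m (PySem.List.pyGetD r.reverse j 0 - PySem.List.pyGetD r.reverse (j-1) 0
        + PySem.List.pyGetD r.reverse (j+1) 0 - PySem.List.pyGetD r.reverse j 0 - 1))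
      (PySem.List.pyGetD r.reverse 1 0) = (bStateRev r).2.2
  | [], h, _ => by simp at h
  | [_], h, _ => by simp at h
  | [b, a], _, hn => by
    have hb : 0 ≤ b := hn b (by simp)
    have h1 : ((([b, a] : List Int).length : Int) - 1) = 1 := by simp
    rw [h1, PySem.List.pyRange_one_eq_nil (by omega)]
    simp only [List.foldl_nil, List.reverse_cons, List.reverse_nil, List.nil_append,
      List.singleton_append]
    have : PySem.List.pyGetD [a, b] 1 0 = b := by
      rw [PySem.List.pyGetD_eq_getElem _ _ (by omega) (by simp)]; rfl
    rw [this]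
    simp only [bStateRev]
    omega
  | i :: c :: d :: rest, _, hn => by
    have ihn : ∀ t ∈ c :: d :: rest, 0 ≤ t := fun t ht => hn t (List.mem_cons_of_mem _ ht)
    have ih := n_lemma (c :: d :: rest) (by simp) ihn
    have hu : (i :: c :: d :: rest).reverse = (c :: d :: rest).reverse ++ [i] := by simp
    have hulen : ((c :: d :: rest).reverse).length = rest.length + 2 := by simp
    have hlen : (((i :: c :: d :: rest) : List Int).length : Int) - 1 = (rest.length : Int) + 2 := by
      simp only [List.length_cons]; push_cast; ring
    rw [hlen, hu]
    -- split off the last loop iteration j = rest.length + 1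
    rw [PySem.List.pyRange_one_append 1 ((rest.length : Int) + 1) ((rest.length : Int) + 2)
      (by omega) (by omega)]
    have hsing : PySem.List.pyRange ((rest.length : Int) + 1) ((rest.length : Int) + 2) 1
        = [(rest.length : Int) + 1] := by
      have h0 := PySem.List.pyRange_one_singleton ((rest.length : Int) + 1)
      rw [show (rest.length : Int) + 1 + 1 = (rest.length : Int) + 2 by ring] at h0
      exact h0
    rw [hsing, List.foldl_append]
    -- the inner iterations only read indices ≤ rest.length + 1, i.e. inside the left part
    have hcongr : ∀ (m j : Int), j ∈ PySem.List.pyRange 1 ((rest.length : Int) + 1) 1 →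
        (fun m j => max m (PySem.List.pyGetD ((c :: d :: rest).reverse ++ [i]) j 0
          - PySem.List.pyGetD ((c :: d :: rest).reverse ++ [i]) (j-1) 0
          + PySem.List.pyGetD ((c :: d :: rest).reverse ++ [i]) (j+1) 0
          - PySem.List.pyGetD ((c :: d :: rest).reverse ++ [i]) j 0 - 1)) m j
        = (fun m j => max m (PySem.List.pyGetD ((c :: d :: rest).reverse) j 0
          - PySem.List.pyGetD ((c :: d :: rest).reverse) (j-1) 0
          + PySem.List.pyGetD ((c :: d :: rest).reverse) (j+1) 0
          - PySem.List.pyGetD ((c :: d :: rest).reverse) j 0 - 1)) m j := by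
      intro m j hj
      rw [PySem.List.mem_pyRange_one] at hj
      simp only
      rw [pyGetD_append_left _ _ j (by omega) (by omega),
          pyGetD_append_left _ _ (j-1) (by omega) (by omega),
          pyGetD_append_left _ _ (j+1) (by omega) (by omega)]
    rw [PySem.List.foldl_congr_mem _ _ _ _ hcongr,
        pyGetD_append_left _ _ 1 (by omega) (by omega)]
    rw [show (((c :: d :: rest) : List Int).length : Int) - 1 = (rest.length : Int) + 1 by
      simp only [List.length_cons]; push_cast; ring] at ih
    rw [ih, List.foldl_cons, List.foldl_nil]
    -- evaluate the last term: the last element is i, the third-from-last is d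
    have hlast : PySem.List.pyGetD ((c :: d :: rest).reverse ++ [i])
        ((rest.length : Int) + 1 + 1) 0 = i := by
      have h0 := pyGetD_append_last ((c :: d :: rest).reverse) i
      rw [hulen] at h0
      rw [show (rest.length : Int) + 1 + 1 = ((rest.length + 2 : Nat) : Int) by push_cast; ring]
      exact h0
    have hd : PySem.List.pyGetD ((c :: d :: rest).reverse ++ [i])
        ((rest.length : Int) + 1 - 1) 0 = d := by
      have hshape : (c :: d :: rest).reverse ++ [i] = (rest.reverse ++ [d]) ++ ([c] ++ [i]) := by
        simp
      rw [hshape, pyGetD_append_left _ _ _ (by omega) (by simp)]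
      have h0 := pyGetD_append_last rest.reverse d
      rw [show (rest.length : Int) + 1 - 1 = ((rest.reverse.length : Nat) : Int) by simp]
      exact h0
    rw [hlast, hd]
    simp only [bStateRev]
    omega

-- ===== VERDICT (by name: the statement is the Claim_ definition above) =====
theorem find_longest_segment_length_spec : Claim_equal_find_longest_segment_length := by
  unfold Claim_equal_find_longest_segment_length
  intro arr k _
  unfold Spec_find_longest_segment_length
  simp only [find_longest_segment_length, find_longest_segment_length_alt]
  have hA : (PySem.List.pyRange 0 (PySem.List.len arr) 1).foldl
      (fun st i => pvAStep k st i (PySem.List.pyGetD arr i 0)) ([], -1)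
      = (PySem.List.enumerate arr).foldl (fun st iv => pvAStep k st iv.1 iv.2) ([], -1) := by
    rw [PySem.List.enumerate_eq_map_pyRange arr 0, List.foldl_map]
  rw [hA]
  set F := (PySem.List.enumerate arr).foldl (fun st (iv : Int × Int) => pvAStep k st iv.1 iv.2) ([], -1) with hF
  have hfold : (PySem.List.enumerate arr).foldl (pvBStep k) (-1, -1, none, 0)
      = (F.2, bStateRev F.1.reverse) := by
    have := fold_agree k (PySem.List.enumerate arr) [] (-1)
    simpa [bStateRev] using this
  rw [hfold]
  have hnn : ∀ t ∈ F.1, 0 ≤ t := by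
    refine fold_nonneg k _ [] (-1) (by simp) ?_
    intro iv hiv
    rw [PySem.List.mem_enumerate_iff] at hiv
    obtain ⟨j, hj, rfl⟩ := hiv
    simp
  have hL : (0 : Int) ≤ PySem.List.len arr := by simp [PySem.List.len]
  rcases h : F.1.reverse with _ | ⟨x, t⟩
  · -- no recorded index
    have hF1 : F.1 = [] := by simpa using congrArg List.reverse h
    simp [hF1, bStateRev]
  · rcases t with _ | ⟨y, t2⟩
    · -- exactly one recorded index
      have hF1 : F.1 = [x] := by simpa using congrArg List.reverse h
      simp only [hF1, bStateRev, List.length_cons, List.length_nil]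
      norm_num
    · -- at least two recorded indices
      have hF1 : F.1 = (x :: y :: t2).reverse := by
        have h0 := congrArg List.reverse h; simpa using h0
      have hnr : ∀ u ∈ x :: y :: t2, 0 ≤ u := by
        intro u hu; apply hnn; rw [hF1, List.mem_reverse]; exact hu
      have hN := n_lemma (x :: y :: t2) (by simp) hnr
      simp only [hF1]
      rw [if_neg (by simp), if_neg (by simp)]
      have hneg2 : PySem.List.pyGetD (x :: y :: t2).reverse (-2) 0 = y := by
        rw [show (x :: y :: t2).reverse = t2.reverse ++ [y, x] by simp]
        exact pyGetD_neg_two t2.reverse y x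
      rw [hneg2]
      rw [show ((((x :: y :: t2).reverse : List Int)).length : Int)
        = (((x :: y :: t2) : List Int).length : Int) by simp only [List.length_reverse]]
      rw [max_comm (PySem.List.pyGetD (x :: y :: t2).reverse 1 0)
        (PySem.List.len arr - y - 1)]
      rw [maxfold_start, hN]
      rw [bStateRev_cur_cons x (y :: t2)]
      rw [bStateRev_fst, ite_gt_eq_max]
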